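-- pv_equiv track=rewrite | github.com/CatgirlGPT/CatgirlGPT | catgirlgpt_prod.py | split_msg
-- ===== SOURCE A (Python) =====
-- def split_msg(msg):
--     # split the dialogue into paragraphs
--     paragraphs = msg.split('\n')
--
--     # calculate the total length of the dialogue
--     total_length = sum(len(p) for p in paragraphs)
--
--     # calculate the length of the first half
--     half_length = total_length // 2
--
--     # find the index of the paragraph that is closest to half_length
--     cumulative_length = 0
--     for i, p in enumerate(paragraphs):
--         cumulative_length += len(p)
--         if cumulative_length >= half_length:
--             break
--
--     # split the dialogue at the index
--     msg1 = '\n'.join(paragraphs[:i+1])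
--     msg2 = '\n'.join(paragraphs[i+1:])
--     return msg1, msg2
-- ===== SOURCE B (Python) =====
-- def split_msg(msg):
--     paragraphs = msg.split('\n')
--     # prefix-sum table of paragraph lengths, then binary search for the
--     # first index whose cumulative length reaches half of the total
--     prefix = []
--     t = 0
--     for p in paragraphs:
--         t += len(p)
--         prefix.append(t)
--     half = t // 2
--     lo, hi = 0, len(prefix) - 1
--     while lo < hi:
--         mid = (lo + hi) // 2
--         if prefix[mid] >= half:
--             hi = mid
--         else:
--             lo = mid + 1
--     return '\n'.join(paragraphs[:lo + 1]), '\n'.join(paragraphs[lo + 1:])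
-- ===== Notes on version B (the rewrite author's own statement) =====
-- stated objective: alternative
-- what changed: Replaces the early-breaking linear scan over cumulative paragraph lengths with a prefix-sum table built once plus a hand-written binary search for the first index whose prefix sum reaches half the total.
import Mathlib
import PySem

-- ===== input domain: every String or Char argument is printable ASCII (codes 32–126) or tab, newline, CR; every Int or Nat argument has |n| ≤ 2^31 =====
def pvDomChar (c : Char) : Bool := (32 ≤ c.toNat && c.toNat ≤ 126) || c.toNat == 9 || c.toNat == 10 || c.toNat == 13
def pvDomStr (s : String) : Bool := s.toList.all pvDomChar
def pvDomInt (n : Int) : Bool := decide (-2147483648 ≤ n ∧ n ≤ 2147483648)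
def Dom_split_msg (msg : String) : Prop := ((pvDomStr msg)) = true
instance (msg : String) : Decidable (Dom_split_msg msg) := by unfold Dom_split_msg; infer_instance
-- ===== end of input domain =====

-- B replaces A's early-breaking linear scan with a prefix-sum table plus a binary search
-- for the first index whose prefix sum reaches half the total (alternative algorithm, same results).

-- ===== PORT A =====
-- the 'for i, p in enumerate(paragraphs): cum += len(p); if cum >= half: break' loop;
-- returns the index at which the loop stops (on the last element the loop ends with that index either way)
def pvALoop (half : Int) : List String → Int → Nat → Nat
  | [], _, i => i
  | [_], _, i => i
  | p :: q :: rest, cum, i =>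
    if half ≤ cum + PySem.Str.len p then i
    else pvALoop half (q :: rest) (cum + PySem.Str.len p) (i + 1)

def split_msg (msg : String) : String × String :=
  let paragraphs := (PySem.Str.split? msg "\n").getD []
  let total := paragraphs.foldl (fun s p => s + PySem.Str.len p) 0
  let half := PySem.Int.floordiv total 2
  let i := pvALoop half paragraphs 0 0
  (PySem.Str.join "\n" (PySem.List.slice paragraphs none (some ((i : Int) + 1))),
   PySem.Str.join "\n" (PySem.List.slice paragraphs (some ((i : Int) + 1)) none))

-- ===== PORT B =====
-- 'while lo < hi: mid = (lo+hi)//2; if prefix[mid] >= half: hi = mid else: lo = mid+1'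
def pvBLoop (half : Int) (pre : List Int) (lo hi : Nat) : Nat :=
  if _h : lo < hi then
    let mid := (lo + hi) / 2
    if half ≤ PySem.List.pyGetD pre (mid : Int) 0 then pvBLoop half pre lo mid
    else pvBLoop half pre (mid + 1) hi
  else lo
termination_by hi - lo
decreasing_by all_goals omega

def split_msg_alt (msg : String) : String × String :=
  let paragraphs := (PySem.Str.split? msg "\n").getD []
  let st := paragraphs.foldl
    (fun (st : List Int × Int) p => (st.1 ++ [st.2 + PySem.Str.len p], st.2 + PySem.Str.len p))
    ([], 0)
  let half := PySem.Int.floordiv st.2 2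
  let lo := pvBLoop half st.1 0 (st.1.length - 1)
  (PySem.Str.join "\n" (PySem.List.slice paragraphs none (some ((lo : Int) + 1))),
   PySem.Str.join "\n" (PySem.List.slice paragraphs (some ((lo : Int) + 1)) none))

-- ===== PRECONDITION & SPEC =====
def Spec_split_msg (msg : String) (out : String × String) : Prop := out = split_msg_alt msg
instance (msg : String) (out : String × String) : Decidable (Spec_split_msg msg out) := by unfold Spec_split_msg; infer_instance

-- ===== CLAIM (what is proved, stated in full; the proofs are below) =====
def Claim_equal_split_msg : Prop := ∀ (msg : String), Dom_split_msg msg → Spec_split_msg msg (split_msg msg)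

-- ===== LEMMAS AND PROOFS =====

/-- sum of the paragraph lengths -/
def pvSum : List String → Int
  | [] => 0
  | p :: r => PySem.Str.len p + pvSum r

/-- prefix sums of the paragraph lengths, starting from `cum` -/
def pvPre (cum : Int) : List String → List Int
  | [] => []
  | p :: r => (cum + PySem.Str.len p) :: pvPre (cum + PySem.Str.len p) r

/-- first index whose entry is ≥ half (length of the list if none) -/
def pvFirst (half : Int) : List Int → Nat
  | [] => 0
  | x :: r => if half ≤ x then 0 else pvFirst half r + 1

theorem pvLen_nonneg (p : String) : 0 ≤ PySem.Str.len p := by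
  simp [PySem.Str.len]

theorem pvSum_nonneg (ps : List String) : 0 ≤ pvSum ps := by
  induction ps with
  | nil => simp [pvSum]
  | cons p r ih => simp only [pvSum]; have := pvLen_nonneg p; omega

theorem pvFoldlSum (ps : List String) (c : Int) :
    ps.foldl (fun s p => s + PySem.Str.len p) c = c + pvSum ps := by
  induction ps generalizing c with
  | nil => simp [pvSum]
  | cons p r ih => simp only [List.foldl_cons, pvSum, ih]; ring

theorem pvFoldlBuild (ps : List String) (acc : List Int) (c : Int) :
    ps.foldl (fun (st : List Int × Int) p => (st.1 ++ [st.2 + PySem.Str.len p], st.2 + PySem.Str.len p)) (acc, c)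
      = (acc ++ pvPre c ps, c + pvSum ps) := by
  induction ps generalizing acc c with
  | nil => simp [pvPre, pvSum]
  | cons p r ih => simp only [List.foldl_cons, pvPre, pvSum, ih]
                   simp [List.append_assoc, add_assoc]

theorem pvPre_length (c : Int) (ps : List String) : (pvPre c ps).length = ps.length := by
  induction ps generalizing c with
  | nil => rfl
  | cons p r ih => simp [pvPre, ih]

theorem pvPre_lb (ps : List String) (c : Int) (j : Nat) (hj : j < ps.length) :
    c ≤ (pvPre c ps).getD j 0 := by
  induction ps generalizing c j with
  | nil => simp at hj
  | cons p r ih =>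
    cases j with
    | zero =>
      simp only [pvPre, List.getD_cons_zero]
      have := pvLen_nonneg p; omega
    | succ j =>
      simp only [pvPre, List.getD_cons_succ]
      have h1 := ih (c + PySem.Str.len p) j (by simpa using hj)
      have := pvLen_nonneg p; omega

theorem pvPre_mono (ps : List String) (c : Int) (j k : Nat) (hjk : j ≤ k) (hk : k < ps.length) :
    (pvPre c ps).getD j 0 ≤ (pvPre c ps).getD k 0 := by
  induction ps generalizing c j k with
  | nil => simp at hk
  | cons p r ih =>
    cases j with
    | zero =>
      cases k with
      | zero => exact le_rfl
      | succ k =>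
        simp only [pvPre, List.getD_cons_zero, List.getD_cons_succ]
        exact pvPre_lb r (c + PySem.Str.len p) k (by simpa using hk)
    | succ j =>
      cases k with
      | zero => omega
      | succ k =>
        simp only [pvPre, List.getD_cons_succ]
        exact ih (c + PySem.Str.len p) j k (by omega) (by simpa using hk)

theorem pvPre_last (ps : List String) (c : Int) (h : ps ≠ []) :
    (pvPre c ps).getD (ps.length - 1) 0 = c + pvSum ps := by
  induction ps generalizing c with
  | nil => exact absurd rfl h
  | cons p r ih =>
    cases r with
    | nil => simp [pvPre, pvSum]
    | cons q s =>
      have := ih (c + PySem.Str.len p) (by simp)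
      simp only [pvPre, pvSum, List.length_cons] at *
      simpa [Nat.succ_sub_one, add_assoc] using this

theorem pvALoop_eq (half : Int) (ps : List String) (c : Int) (i : Nat)
    (hne : ps ≠ []) (hh : half ≤ c + pvSum ps) :
    pvALoop half ps c i = i + pvFirst half (pvPre c ps) := by
  induction ps generalizing c i with
  | nil => exact absurd rfl hne
  | cons p r ih =>
    cases r with
    | nil =>
      have hh' : half ≤ c + PySem.Str.len p := by simp only [pvSum] at hh; omega
      simp only [pvALoop, pvPre, pvFirst]
      split_ifs
      omega
    | cons q s =>
      have hh' : half ≤ (c + PySem.Str.len p) + pvSum (q :: s) := by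
        simp only [pvSum] at hh ⊢; omega
      have hrec := ih (c + PySem.Str.len p) (i + 1) (by simp) hh'
      simp only [pvALoop, pvPre, pvFirst] at hrec ⊢
      split_ifs at hrec ⊢ <;> omega

theorem pvFirst_unique (half : Int) (pre : List Int) (k : Nat) (hk : k < pre.length)
    (h1 : half ≤ pre.getD k 0) (h2 : ∀ j, j < k → pre.getD j 0 < half) :
    pvFirst half pre = k := by
  induction pre generalizing k with
  | nil => simp at hk
  | cons x r ih =>
    by_cases hx : half ≤ x
    · simp only [pvFirst, if_pos hx]
      by_contra hne
      have := h2 0 (by omega)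
      simp at this; omega
    · simp only [pvFirst, if_neg hx]
      cases k with
      | zero => simp at h1; omega
      | succ k =>
        have := ih k (by simpa using hk) (by simpa using h1)
          (fun j hj => by simpa using h2 (j + 1) (by omega))
        omega

theorem pvBLoop_eq (half : Int) (pre : List Int)
    (mono : ∀ j k, j ≤ k → k < pre.length → pre.getD j 0 ≤ pre.getD k 0) :
    ∀ n lo hi, hi - lo ≤ n → lo ≤ hi → hi < pre.length →
      half ≤ pre.getD hi 0 → (∀ j, j < lo → pre.getD j 0 < half) →
      pvBLoop half pre lo hi = pvFirst half pre := by
  intro n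
  induction n with
  | zero =>
    intro lo hi hn hlh hlen hhi hlo
    have : lo = hi := by omega
    subst this
    rw [pvBLoop]
    simp only [lt_irrefl, dite_false]
    exact (pvFirst_unique half pre lo hlen hhi hlo).symm
  | succ n ih =>
    intro lo hi hn hlh hlen hhi hlo
    rw [pvBLoop]
    by_cases h : lo < hi
    · simp only [h, dite_true]
      have hmid2 : (lo + hi) / 2 < hi := by omega
      have hmlen : (lo + hi) / 2 < pre.length := by omega
      rw [PySem.List.pyGetD_natCast]
      by_cases hb : half ≤ pre.getD ((lo + hi) / 2) 0
      · rw [if_pos hb]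
        exact ih lo ((lo + hi) / 2) (by omega) (by omega) hmlen hb hlo
      · rw [if_neg hb]
        refine ih ((lo + hi) / 2 + 1) hi (by omega) (by omega) hlen hhi ?_
        intro j hj
        rcases Nat.lt_or_ge j lo with hjlo | hjlo
        · exact hlo j hjlo
        · exact lt_of_le_of_lt (mono j ((lo + hi) / 2) (by omega) hmlen) (by omega)
    · simp only [h, dite_false]
      have : lo = hi := by omega
      subst this
      exact (pvFirst_unique half pre lo hlen hhi hlo).symm

theorem pvIndex_eq (ps : List String) :
    pvALoop (PySem.Int.floordiv (pvSum ps) 2) ps 0 0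
      = pvBLoop (PySem.Int.floordiv (pvSum ps) 2) (pvPre 0 ps) 0 ((pvPre 0 ps).length - 1) := by
  cases ps with
  | nil => rw [pvBLoop]; simp [pvALoop, pvPre]
  | cons p r =>
    set ps := p :: r with hps
    set half := PySem.Int.floordiv (pvSum ps) 2 with hhalf
    have hS : 0 ≤ pvSum ps := pvSum_nonneg ps
    have hh : half ≤ pvSum ps := Int.fdiv_le_self 2 hS
    have hlen : (pvPre 0 ps).length = ps.length := pvPre_length 0 ps
    have hnein : (0 : Nat) < ps.length := by simp [hps]
    rw [pvALoop_eq half ps 0 0 (by simp [hps]) (by omega)]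
    rw [pvBLoop_eq half (pvPre 0 ps)
      (fun j k hjk hk => pvPre_mono ps 0 j k hjk (by omega))
      ((pvPre 0 ps).length - 1) 0 ((pvPre 0 ps).length - 1)
      (by omega) (by omega) (by omega)
      (by rw [hlen]; rw [pvPre_last ps 0 (by simp [hps])]; omega)
      (by omega)]
    omega

-- ===== VERDICT (by name: the statement is the Claim_ definition above) =====
theorem split_msg_spec : Claim_equal_split_msg := by
  intro msg _
  unfold Spec_split_msg
  simp only [split_msg, split_msg_alt]
  rw [pvFoldlSum, pvFoldlBuild]
  simp only [zero_add, List.nil_append]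
  rw [pvIndex_eq]
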